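-- pv_equiv track=rewrite | github.com/KrzysztofOle/konwersja-do-erp-optima | working/optima_reader.py | _tail_names
-- ===== SOURCE A (Python) =====
-- from typing import Iterable, IO, Union, Dict, List
--
-- def _tail_names(n: int) -> List[str]:
--     """
--     Generuje nazwy dla kolumn „ogona” po 59 kolumnach rdzeniowych:
--     flaga_1, stawka_1, netto_1, vat_1, flaga_2, stawka_2, netto_2, vat_2, ...
--
--     Jeśli kolumn jest więcej i nie mieszczą się w pełnych czwórkach,
--     nadmiarowe nazywamy 'extra_{i}'.
--     """
--     pattern = ['flaga', 'stawka', 'netto', 'vat']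
--     names: List[str] = []
--     i = 1
--     # pełne paczki po 4
--     while len(names) + 4 <= n:
--         names.extend([f'{p}_{i}' for p in pattern])
--         i += 1
--     # ewentualne resztki
--     while len(names) < n:
--         names.append(f'extra_{len(names) + 1}')
--     return names
-- ===== SOURCE B (Python) =====
-- from typing import List
--
--
-- def _tail_names(n: int) -> List[str]:
--     pattern = ['flaga', 'stawka', 'netto', 'vat']
--
--     def name(k: int) -> str:
--         g = (k + 3) // 4          # index of the quadruple containing position k
--         if 4 * g <= n:            # that quadruple completes within the n columns
--             return f'{pattern[(k - 1) % 4]}_{g}'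
--         return f'extra_{k}'
--
--     return [name(k) for k in range(1, n + 1)]
-- ===== Notes on version B (the rewrite author's own statement) =====
-- stated objective: alternative
-- what changed: Each column's name is computed independently from its 1-based position by modular arithmetic (quadruple index (k+3)//4, pattern slot (k-1)%4, with a per-position completeness test 4*g<=n), in a single map over range(1,n+1), instead of A's sequential generation with two length-driven while loops.
import Mathlib
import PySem

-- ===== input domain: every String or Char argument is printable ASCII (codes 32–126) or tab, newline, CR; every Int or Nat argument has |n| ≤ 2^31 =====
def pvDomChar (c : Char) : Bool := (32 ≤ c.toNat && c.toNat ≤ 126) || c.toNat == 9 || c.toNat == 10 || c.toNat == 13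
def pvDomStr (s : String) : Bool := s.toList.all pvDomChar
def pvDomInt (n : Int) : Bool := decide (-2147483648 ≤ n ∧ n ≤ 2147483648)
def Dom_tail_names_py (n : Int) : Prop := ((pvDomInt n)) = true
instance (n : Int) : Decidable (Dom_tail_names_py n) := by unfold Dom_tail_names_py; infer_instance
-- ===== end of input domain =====

-- B computes each column's name independently from its position by modular arithmetic,
-- one map over range(1, n+1), instead of A's two sequential length-driven while loops (objective: alternative).

-- ===== PORT A =====
-- names for one full quadruple, pattern fixed as in A
def pvQuad (i : Int) : List String :=
  ["flaga", "stawka", "netto", "vat"].map (fun p => p ++ "_" ++ PySem.Int.toStr i)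

-- first while loop: while len(names) + 4 <= n
def pvLoop1 (n : Int) (names : List String) (i : Int) : List String :=
  if h : (names.length : Int) + 4 ≤ n then
    pvLoop1 n (names ++ pvQuad i) (i + 1)
  else names
termination_by (n - names.length).toNat
decreasing_by simp [pvQuad]; omega

-- second while loop: while len(names) < n
def pvLoop2 (n : Int) (names : List String) : List String :=
  if h : (names.length : Int) < n then
    pvLoop2 n (names ++ ["extra_" ++ PySem.Int.toStr ((names.length : Int) + 1)])
  else names
termination_by (n - names.length).toNat
decreasing_by simp; omega

def tail_names_py (n : Int) : List String :=
  pvLoop2 n (pvLoop1 n [] 1)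

-- ===== PORT B =====
-- name(k): the column name at 1-based position k, computed directly from k
def pvName (n k : Int) : String :=
  let g := PySem.Int.floordiv (k + 3) 4
  if 4 * g ≤ n then
    PySem.List.pyGetD ["flaga", "stawka", "netto", "vat"] (PySem.Int.mod (k - 1) 4) ""
      ++ "_" ++ PySem.Int.toStr g
  else
    "extra_" ++ PySem.Int.toStr k

def tail_names_py_alt (n : Int) : List String :=
  (PySem.List.pyRange 1 (n + 1) 1).map (pvName n)

-- ===== PRECONDITION & SPEC =====
def Spec_tail_names_py (n : Int) (out : List String) : Prop := out = tail_names_py_alt n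
instance (n : Int) (out : List String) : Decidable (Spec_tail_names_py n out) := by unfold Spec_tail_names_py; infer_instance

-- ===== CLAIM (what is proved, stated in full; the proofs are below) =====
def Claim_equal_tail_names_py : Prop := ∀ (n : Int), Dom_tail_names_py n → Spec_tail_names_py n (tail_names_py n)

-- ===== LEMMAS AND PROOFS =====

theorem pvLoop1_eq (n : Int) (names : List String) (i : Int) :
    pvLoop1 n names i =
      names ++ (PySem.List.pyRange i (i + ((n - names.length).toNat / 4 : Nat)) 1).flatMap pvQuad := by
  refine pvLoop1.induct n
    (motive := fun names i => pvLoop1 n names i =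
      names ++ (PySem.List.pyRange i (i + ((n - names.length).toNat / 4 : Nat)) 1).flatMap pvQuad)
    ?_ ?_ names i
  · intro names i h ih
    rw [pvLoop1, dif_pos h, ih, List.append_assoc]
    congr 1
    rw [PySem.List.pyRange_one_cons (a := i) (b := i + (((n - (names.length : Int)).toNat / 4 : Nat) : Int)) (by omega)]
    simp only [List.flatMap_cons]
    have hlen : (((names ++ pvQuad i).length : Nat) : Int) = (names.length : Int) + 4 := by
      simp [pvQuad]
    rw [hlen]
    have hend : i + 1 + (((n - ((names.length : Int) + 4)).toNat / 4 : Nat) : Int)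
        = i + 1 + ((((n - (names.length : Int)).toNat / 4 : Nat) : Int) - 1) := by omega
    rw [hend]
    ring_nf
  · intro names i h
    rw [pvLoop1, dif_neg h]
    have h0 : (n - (names.length : Int)).toNat / 4 = 0 := by omega
    rw [h0]
    rw [PySem.List.pyRange_one_eq_nil (show i + ((0 : Nat) : Int) ≤ i by omega)]
    simp

theorem pvLoop2_eq (n : Int) (names : List String) :
    pvLoop2 n names =
      names ++ (PySem.List.pyRange ((names.length : Int) + 1) (n + 1) 1).map
        (fun j => "extra_" ++ PySem.Int.toStr j) := by
  refine pvLoop2.induct n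
    (motive := fun names => pvLoop2 n names =
      names ++ (PySem.List.pyRange ((names.length : Int) + 1) (n + 1) 1).map
        (fun j => "extra_" ++ PySem.Int.toStr j))
    ?_ ?_ names
  · intro names h ih
    rw [pvLoop2, dif_pos h, ih, List.append_assoc]
    congr 1
    rw [PySem.List.pyRange_one_cons (a := (names.length : Int) + 1) (b := n + 1) (by omega)]
    simp only [List.map_cons]
    have hlen : (((names ++ ["extra_" ++ PySem.Int.toStr ((names.length : Int) + 1)]).length : Nat) : Int)
        = (names.length : Int) + 1 := by simp
    rw [hlen]
    simp
  · intro names h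
    rw [pvLoop2, dif_neg h]
    rw [PySem.List.pyRange_one_eq_nil (by omega)]
    simp

theorem length_flatMap_pvQuad (xs : List Int) : (xs.flatMap pvQuad).length = 4 * xs.length := by
  induction xs with
  | nil => simp
  | cons x xs ih => simp [pvQuad, ih]; omega

-- pvName on the four positions of a complete quadruple gives exactly pvQuad
theorem pvName_quad (n : Int) (f : Nat) (h : 4 * ((f : Int) + 1) ≤ n) :
    [pvName n (4 * f + 1), pvName n (4 * f + 2), pvName n (4 * f + 3), pvName n (4 * f + 4)]
      = pvQuad ((f : Int) + 1) := by
  have hg1 : PySem.Int.floordiv (4 * (f : Int) + 1 + 3) 4 = (f : Int) + 1 := by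
    rw [PySem.Int.floordiv_eq_ediv_of_pos (by norm_num)]; omega
  have hg2 : PySem.Int.floordiv (4 * (f : Int) + 2 + 3) 4 = (f : Int) + 1 := by
    rw [PySem.Int.floordiv_eq_ediv_of_pos (by norm_num)]; omega
  have hg3 : PySem.Int.floordiv (4 * (f : Int) + 3 + 3) 4 = (f : Int) + 1 := by
    rw [PySem.Int.floordiv_eq_ediv_of_pos (by norm_num)]; omega
  have hg4 : PySem.Int.floordiv (4 * (f : Int) + 4 + 3) 4 = (f : Int) + 1 := by
    rw [PySem.Int.floordiv_eq_ediv_of_pos (by norm_num)]; omega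
  have hm1 : PySem.Int.mod (4 * (f : Int) + 1 - 1) 4 = 0 := by
    rw [PySem.Int.mod_eq_emod_of_pos (by norm_num)]; omega
  have hm2 : PySem.Int.mod (4 * (f : Int) + 2 - 1) 4 = 1 := by
    rw [PySem.Int.mod_eq_emod_of_pos (by norm_num)]; omega
  have hm3 : PySem.Int.mod (4 * (f : Int) + 3 - 1) 4 = 2 := by
    rw [PySem.Int.mod_eq_emod_of_pos (by norm_num)]; omega
  have hm4 : PySem.Int.mod (4 * (f : Int) + 4 - 1) 4 = 3 := by
    rw [PySem.Int.mod_eq_emod_of_pos (by norm_num)]; omega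
  simp only [pvName, hg1, hg2, hg3, hg4, hm1, hm2, hm3, hm4, if_pos h, pvQuad, List.map_cons,
    List.map_nil]
  norm_num [PySem.List.pyGetD]
  exact ⟨rfl, rfl⟩

-- the first 4*f positions, mapped through pvName, give f complete quadruples
theorem pvName_map_core (n : Int) (f : Nat) (h : 4 * (f : Int) ≤ n) :
    (PySem.List.pyRange 1 (4 * (f : Int) + 1) 1).map (pvName n)
      = (PySem.List.pyRange 1 ((f : Int) + 1) 1).flatMap pvQuad := by
  induction f with
  | zero =>
      rw [PySem.List.pyRange_one_eq_nil (by omega), PySem.List.pyRange_one_eq_nil (by omega)]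
      simp
  | succ f ih =>
      have hf : 4 * (f : Int) ≤ n := by push_cast at h ⊢; omega
      rw [PySem.List.pyRange_one_append 1 (4 * (f : Int) + 1) (4 * ((f : Nat) + 1 : Nat) + 1)
            (by omega) (by push_cast; omega),
          PySem.List.pyRange_one_append 1 ((f : Int) + 1) (((f : Nat) + 1 : Nat) + 1)
            (by omega) (by push_cast; omega),
          List.map_append, List.flatMap_append, ih hf]
      congr 1
      have e1 : PySem.List.pyRange (4 * (f : Int) + 1) (4 * ((f : Nat) + 1 : Nat) + 1) 1
          = [4 * (f : Int) + 1, 4 * (f : Int) + 2, 4 * (f : Int) + 3, 4 * (f : Int) + 4] := by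
        push_cast
        rw [PySem.List.pyRange_one_cons (by omega), PySem.List.pyRange_one_cons (by omega),
            PySem.List.pyRange_one_cons (by omega), PySem.List.pyRange_one_cons (by omega),
            PySem.List.pyRange_one_eq_nil (by omega)]
        norm_num
        omega
      have e2 : PySem.List.pyRange ((f : Int) + 1) (((f : Nat) + 1 : Nat) + 1) 1
          = [(f : Int) + 1] := by
        push_cast
        rw [PySem.List.pyRange_one_cons (by omega), PySem.List.pyRange_one_eq_nil (by omega)]
      rw [e1, e2, List.map_cons, List.map_cons, List.map_cons, List.map_cons, List.map_nil]
      have := pvName_quad n f (by push_cast at h ⊢; omega)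
      simp only [List.flatMap_cons, List.flatMap_nil, List.append_nil]
      exact this

-- ===== VERDICT (by name: the statement is the Claim_ definition above) =====
theorem tail_names_py_spec : Claim_equal_tail_names_py := by
  intro n _
  unfold Spec_tail_names_py tail_names_py tail_names_py_alt
  rw [pvLoop1_eq, pvLoop2_eq]
  simp only [List.nil_append, List.length_nil, Nat.cast_zero, sub_zero]
  set f : Nat := n.toNat / 4 with hf
  by_cases hn : 0 ≤ n
  · -- split B's range at position 4*f
    rw [PySem.List.pyRange_one_append 1 (4 * (f : Int) + 1) (n + 1) (by omega) (by omega),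
        List.map_append]
    have hcore : (PySem.List.pyRange 1 (4 * (f : Int) + 1) 1).map (pvName n)
        = (PySem.List.pyRange 1 ((f : Int) + 1) 1).flatMap pvQuad := by
      exact pvName_map_core n f (by omega)
    have hL : ((((PySem.List.pyRange 1 (1 + ((f : Nat) : Int)) 1).flatMap pvQuad).length : Nat) : Int)
        = 4 * ((f : Nat) : Int) := by
      rw [length_flatMap_pvQuad, PySem.List.length_pyRange_one]
      push_cast; omega
    have hextra : (PySem.List.pyRange (4 * (f : Int) + 1) (n + 1) 1).map (pvName n)
        = (PySem.List.pyRange (4 * (f : Int) + 1) (n + 1) 1).map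
            (fun j => "extra_" ++ PySem.Int.toStr j) := by
      apply List.map_congr_left
      intro k hk
      rw [PySem.List.mem_pyRange_one] at hk
      have hgk : ¬ (4 * PySem.Int.floordiv (k + 3) 4 ≤ n) := by
        rw [PySem.Int.floordiv_eq_ediv_of_pos (by norm_num)]
        omega
      simp only [pvName, if_neg hgk]
    rw [hcore, hextra]
    congr 2
    · rw [add_comm]
    · rw [hL]
  · -- n < 0: everything is empty
    have h0 : f = 0 := by omega
    rw [h0]
    rw [PySem.List.pyRange_one_eq_nil (show n + 1 ≤ 1 by omega),
        PySem.List.pyRange_one_eq_nil (show 1 + ((0 : Nat) : Int) ≤ 1 by omega)]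
    simp
    rw [PySem.List.pyRange_one_eq_nil (show n + 1 ≤ 1 by omega)]
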